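-- pv_equiv track=rewrite | github.com/karlomijoc23/MK-proptech | backend/app/core/roles.py | scope_matches
-- ===== SOURCE A (Python) =====
-- from typing import Dict, List, Optional
--
-- def scope_matches(granted: List[str], required: str) -> bool:
--     if "*" in granted:
--         return True
--     if required in granted:
--         return True
--     if ":" not in required:
--         return False
--     resource, action = required.split(":", 1)
--     wildcard = f"{resource}:*"
--     if wildcard in granted:
--         return True
--     # allow hierarchical permission where write implies read
--     if action == "read":
--         for perm in granted:
--             if perm.startswith(f"{resource}:") and perm != required:
--                 return True
--     return False
-- ===== SOURCE B (Python) =====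
-- def perm_grants(perm, required):
--     """Does the single granted permission `perm` satisfy `required`?"""
--     if perm == "*" or perm == required:
--         return True
--     if ":" not in required:
--         return False
--     resource, action = required.split(":", 1)
--     if perm == f"{resource}:*":
--         return True
--     return action == "read" and perm.startswith(f"{resource}:") and perm != required
--
--
-- def scope_matches(granted, required):
--     return any(perm_grants(perm, required) for perm in granted)
-- ===== Notes on version B (the rewrite author's own statement) =====
-- stated objective: simpler
-- what changed: Replaces A's four sequential containment scans and a dedicated hierarchical-read loop with a single per-permission predicate perm_grants and one any() pass over granted.
import Mathlib
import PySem

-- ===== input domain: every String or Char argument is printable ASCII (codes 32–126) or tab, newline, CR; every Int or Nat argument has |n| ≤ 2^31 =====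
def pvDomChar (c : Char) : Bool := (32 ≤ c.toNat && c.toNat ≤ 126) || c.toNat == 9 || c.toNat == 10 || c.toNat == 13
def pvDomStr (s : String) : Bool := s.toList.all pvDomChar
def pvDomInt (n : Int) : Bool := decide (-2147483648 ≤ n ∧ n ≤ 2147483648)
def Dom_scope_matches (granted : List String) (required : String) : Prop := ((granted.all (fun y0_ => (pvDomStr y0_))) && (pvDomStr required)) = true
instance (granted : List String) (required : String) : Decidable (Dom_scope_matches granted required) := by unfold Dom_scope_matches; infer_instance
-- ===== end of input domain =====

-- B decomposes the check as one per-permission predicate (perm_grants) applied in a single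
-- any-pass, instead of A's several containment scans plus a dedicated hierarchical-read loop.

-- ===== PORT A =====
def scope_matches (granted : List String) (required : String) : Bool :=
  if granted.contains "*" then true
  else if granted.contains required then true
  else if !(PySem.Str.isIn ":" required) then false
  else
    match PySem.Str.splitMax? required ":" 1 with
    | some (resource :: action :: _) =>
      let wildcard := resource ++ ":*"
      if granted.contains wildcard then true
      else if action == "read" then
        granted.any (fun perm =>
          PySem.Str.startswith perm (resource ++ ":") && perm != required)
      else false
    | _ => false   -- unreachable (':' in required guarantees a 2-way split); guard only makes the port total

-- ===== PORT B =====
def perm_grants (perm : String) (required : String) : Bool :=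
  if perm == "*" || perm == required then true
  else if !(PySem.Str.isIn ":" required) then false
  else
    match PySem.Str.splitMax? required ":" 1 with
    | none => false   -- unreachable (sep ≠ ""); guard only makes the port total
    | some parts =>
      match parts with
      | [] => false        -- unreachable (':' in required guarantees a 2-way split)
      | [_] => false       -- unreachable likewise
      | resource :: action :: _ =>
        if perm == resource ++ ":*" then true
        else action == "read" && PySem.Str.startswith perm (resource ++ ":") && perm != required

def scope_matches_alt (granted : List String) (required : String) : Bool :=
  granted.any (fun perm => perm_grants perm required)

-- ===== PRECONDITION & SPEC =====
def Spec_scope_matches (granted : List String) (required : String) (out : Bool) : Prop := out = scope_matches_alt granted required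
instance (granted : List String) (required : String) (out : Bool) : Decidable (Spec_scope_matches granted required out) := by unfold Spec_scope_matches; infer_instance

-- ===== CLAIM (what is proved, stated in full; the proofs are below) =====
def Claim_equal_scope_matches : Prop := ∀ (granted : List String) (required : String), Dom_scope_matches granted required → Spec_scope_matches granted required (scope_matches granted required)

-- ===== LEMMAS AND PROOFS =====

theorem contains_eq_any (l : List String) (v : String) :
    l.contains v = l.any (fun x => x == v) := by
  simp [List.any_beq']

theorem any_or_distrib (l : List String) (p q : String → Bool) :
    l.any (fun x => p x || q x) = (l.any p || l.any q) := by
  induction l with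
  | nil => rfl
  | cons x xs ih => cases hp : p x <;> cases hq : q x <;> simp [List.any_cons, hp, hq, ih]

theorem any_const_and (l : List String) (c : Bool) (p : String → Bool) :
    l.any (fun x => c && p x) = (c && l.any p) := by
  cases c <;> simp

-- the value A computes when the hierarchy machinery is not reached, as one any-pass
theorem base_case (granted : List String) (required : String) :
    (if granted.contains "*" then true
     else if granted.contains required then (true : Bool) else false)
      = granted.any (fun x => x == "*" || x == required) := by
  rw [any_or_distrib, ← contains_eq_any, ← contains_eq_any]
  cases granted.contains "*" <;> cases granted.contains required <;> simp

theorem scope_matches_eq_alt (granted : List String) (required : String) :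
    scope_matches granted required = scope_matches_alt granted required := by
  unfold scope_matches scope_matches_alt perm_grants
  cases hc : PySem.Str.isIn ":" required with
  | false =>
    simp only [Bool.not_false, if_true]
    rw [base_case]
    congr 1; funext x
    cases h : (x == "*" || x == required) <;> simp
  | true =>
    simp only [Bool.not_true]
    rcases ho : PySem.Str.splitMax? required ":" 1 with _ | ⟨_ | ⟨r, _ | ⟨a, rest⟩⟩⟩
    · simp only [Bool.false_eq_true, if_false]
      rw [base_case]
      congr 1; funext x
      cases h : (x == "*" || x == required) <;> simp
    · simp only [Bool.false_eq_true, if_false]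
      rw [base_case]
      congr 1; funext x
      cases h : (x == "*" || x == required) <;> simp
    · simp only [Bool.false_eq_true, if_false]
      rw [base_case]
      congr 1; funext x
      cases h : (x == "*" || x == required) <;> simp
    · simp only [Bool.false_eq_true, if_false]
      have hrhs : (granted.any (fun perm =>
          if perm == "*" || perm == required then true
          else if perm == r ++ ":*" then true
          else a == "read" && PySem.Str.startswith perm (r ++ ":") && perm != required))
        = (granted.any (fun x => x == "*") || granted.any (fun x => x == required)
            || granted.any (fun x => x == r ++ ":*")
            || (a == "read" && granted.any (fun perm =>
                  PySem.Str.startswith perm (r ++ ":") && perm != required))) := by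
        rw [← any_const_and, ← any_or_distrib, ← any_or_distrib, ← any_or_distrib]
        congr 1; funext x
        cases h1 : (x == "*") <;> cases h2 : (x == required) <;>
          cases h3 : (x == r ++ ":*") <;> simp [Bool.and_assoc]
      rw [hrhs, ← contains_eq_any, ← contains_eq_any, ← contains_eq_any]
      cases granted.contains "*" <;> cases granted.contains required <;>
        cases granted.contains (r ++ ":*") <;> cases a == "read" <;> simp

-- ===== VERDICT (by name: the statement is the Claim_ definition above) =====
theorem scope_matches_spec : Claim_equal_scope_matches := by
  intro granted required _
  exact scope_matches_eq_alt granted required
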